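-- pv_equiv track=rewrite | github.com/hjb-gitting/EoM-Rylie-Scripts | EOM_DYEING.py | triplealternate
-- ===== SOURCE A (Python) =====
-- import itertools
--
-- def triplealternate(text, c1, c2, c3):
--     textf = list(text)
--     p4 = textf[3::4]
--     p3 = textf[2::4]
--     p2 = textf[1::4]
--     p1 = textf[::4]
--     p4c = []
--     p3c = []
--     p2c = []
--     p1c = []
--     for i in p1:
--         if i == " ":
--             p1c.append(i)
--         else:
--             p1c.append(c1 + i)
--     for i in p2:
--         if i == " ":
--             p2c.append(i)
--         else:
--             p2c.append(c2 + i)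
--     for i in p3:
--         if i == " ":
--             p3c.append(i)
--         else:
--             p3c.append(c3 + i)
--     for i in p4:
--         if i == " ":
--             p4c.append(i)
--         else:
--             p4c.append(c2 + i)
--
--     form = []
--     for a,b,c,d, in itertools.zip_longest(p1c, p2c, p3c, p4c):
--         if a:
--             form.append(a)
--         if b:
--             form.append(b)
--         if c:
--             form.append(c)
--         if d:
--             form.append(d)
--
--     return "".join(form)
-- ===== SOURCE B (Python) =====
-- def triplealternate(text, c1, c2, c3):
--     colors = (c1, c2, c3, c2)
--     out = []
--     for i, ch in enumerate(text):
--         out.append(ch if ch == " " else colors[i % 4] + ch)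
--     return "".join(out)
-- ===== Notes on version B (the rewrite author's own statement) =====
-- stated objective: simpler
-- what changed: Replaces the four stride-slices, four separate colorize loops and the zip_longest/truthiness reinterleave with one pass over enumerate(text) picking the color from a fixed (c1,c2,c3,c2) pattern by i % 4.
import Mathlib
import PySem

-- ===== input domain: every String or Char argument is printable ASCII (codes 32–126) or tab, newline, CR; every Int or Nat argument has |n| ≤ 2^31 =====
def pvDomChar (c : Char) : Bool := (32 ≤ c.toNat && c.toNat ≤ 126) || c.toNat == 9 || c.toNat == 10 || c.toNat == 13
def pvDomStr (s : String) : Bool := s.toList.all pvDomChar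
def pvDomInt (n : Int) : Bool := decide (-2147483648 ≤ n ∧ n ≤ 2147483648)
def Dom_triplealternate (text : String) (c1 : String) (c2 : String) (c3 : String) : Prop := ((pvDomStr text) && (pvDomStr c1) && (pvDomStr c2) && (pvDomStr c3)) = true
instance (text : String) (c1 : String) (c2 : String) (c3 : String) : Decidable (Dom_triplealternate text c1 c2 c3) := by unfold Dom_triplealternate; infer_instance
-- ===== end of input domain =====

-- B replaces A's four stride-slices + four colorize loops + zip_longest reinterleave by one
-- pass over enumerate(text) choosing the color by i % 4 from the fixed (c1,c2,c3,c2) pattern (simpler).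

-- ===== PORT A =====
-- for i in pX: if i == " ": append(i) else: append(cX + i)
def pvColorLoop (p : List Char) (col : List Char) : List (List Char) :=
  p.foldl (fun acc i => if i = ' ' then acc ++ [[i]] else acc ++ [col ++ [i]]) []

-- itertools.zip_longest over the four piece lists (fill value None)
def pvZip4 (a b c d : List (List Char)) :
    List (Option (List Char) × Option (List Char) × Option (List Char) × Option (List Char)) :=
  if a = [] ∧ b = [] ∧ c = [] ∧ d = [] then []
  else (a.head?, b.head?, c.head?, d.head?) :: pvZip4 a.tail b.tail c.tail d.tail
termination_by a.length + b.length + c.length + d.length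
decreasing_by
  rcases a with _ | ⟨x, a⟩ <;> rcases b with _ | ⟨y, b⟩ <;> rcases c with _ | ⟨z, c⟩ <;>
    rcases d with _ | ⟨w, d⟩ <;> simp_all <;> omega

-- 'if x: form.append(x)' — falsy is None or the empty string
def pvAppIf (form : List (List Char)) (x : Option (List Char)) : List (List Char) :=
  match x with
  | some s => if s = [] then form else form ++ [s]
  | none => form

def triplealternate (text : String) (c1 : String) (c2 : String) (c3 : String) : String :=
  let textf := text.toList
  let p4 := (PySem.List.slice? textf (some 3) none 4).getD []
  let p3 := (PySem.List.slice? textf (some 2) none 4).getD []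
  let p2 := (PySem.List.slice? textf (some 1) none 4).getD []
  let p1 := (PySem.List.slice? textf none none 4).getD []
  let p1c := pvColorLoop p1 c1.toList
  let p2c := pvColorLoop p2 c2.toList
  let p3c := pvColorLoop p3 c3.toList
  let p4c := pvColorLoop p4 c2.toList
  let form := (pvZip4 p1c p2c p3c p4c).foldl
    (fun form t => pvAppIf (pvAppIf (pvAppIf (pvAppIf form t.1) t.2.1) t.2.2.1) t.2.2.2) []
  String.ofList form.flatten  -- "".join(form)

-- ===== PORT B =====
def triplealternate_alt (text : String) (c1 : String) (c2 : String) (c3 : String) : String :=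
  let colors := [c1.toList, c2.toList, c3.toList, c2.toList]
  let out := (PySem.List.enumerate text.toList 0).foldl
    (fun out p =>
      out ++ [if p.2 = ' ' then [p.2]
              else PySem.List.pyGetD colors (PySem.Int.mod p.1 4) [] ++ [p.2]]) []
  String.ofList out.flatten  -- "".join(out)

-- ===== PRECONDITION & SPEC =====
def Spec_triplealternate (text : String) (c1 : String) (c2 : String) (c3 : String) (out : String) : Prop := out = triplealternate_alt text c1 c2 c3
instance (text : String) (c1 : String) (c2 : String) (c3 : String) (out : String) : Decidable (Spec_triplealternate text c1 c2 c3 out) := by unfold Spec_triplealternate; infer_instance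

-- ===== CLAIM (what is proved, stated in full; the proofs are below) =====
def Claim_equal_triplealternate : Prop := ∀ (text : String) (c1 : String) (c2 : String) (c3 : String), Dom_triplealternate text c1 c2 c3 → Spec_triplealternate text c1 c2 c3 (triplealternate text c1 c2 c3)

-- ===== LEMMAS AND PROOFS =====

-- every 4th element, starting at the head
def pvStride4 {α : Type} : List α → List α
  | [] => []
  | x :: xs => x :: pvStride4 (xs.drop 3)
termination_by xs => xs.length
decreasing_by simp

lemma pvStride4_nil {α : Type} : pvStride4 ([] : List α) = [] := by rw [pvStride4]

lemma pvStride4_cons {α : Type} (x : α) (xs : List α) :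
    pvStride4 (x :: xs) = x :: pvStride4 (xs.drop 3) := by rw [pvStride4]

lemma pvZip4_nil : pvZip4 [] [] [] [] = [] := by rw [pvZip4]; simp

lemma pvZip4_step (a b c d : List (List Char))
    (h : ¬(a = [] ∧ b = [] ∧ c = [] ∧ d = [])) :
    pvZip4 a b c d = (a.head?, b.head?, c.head?, d.head?) :: pvZip4 a.tail b.tail c.tail d.tail := by
  rw [pvZip4]; simp [h]

-- the piece produced for the character at absolute index j
def pvPiece (c1l c2l c3l : List Char) (j : Nat) (ch : Char) : List Char :=
  if ch = ' ' then [ch] else [c1l, c2l, c3l, c2l].getD (j % 4) [] ++ [ch]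

def pvSpec (c1l c2l c3l : List Char) : List Char → Nat → List (List Char)
  | [], _ => []
  | ch :: t, j => pvPiece c1l c2l c3l j ch :: pvSpec c1l c2l c3l t (j + 1)

lemma pvSpec_shift (c1l c2l c3l : List Char) (cs : List Char) :
    ∀ j, pvSpec c1l c2l c3l cs (j + 4) = pvSpec c1l c2l c3l cs j := by
  induction cs with
  | nil => intro j; rfl
  | cons ch t ih =>
      intro j
      have h4 : (j + 4) % 4 = j % 4 := by omega
      have h5 : j + 4 + 1 = (j + 1) + 4 := by omega
      simp [pvSpec, pvPiece, h4, h5, ih]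

lemma pvColorLoop_eq_map (p col : List Char) :
    pvColorLoop p col = p.map (fun i => if i = ' ' then [i] else col ++ [i]) := by
  unfold pvColorLoop
  have h : (fun (acc : List (List Char)) (i : Char) =>
      if i = ' ' then acc ++ [[i]] else acc ++ [col ++ [i]]) =
      fun acc i => acc ++ [if i = ' ' then [i] else col ++ [i]] := by
    funext acc i; split <;> rfl
  rw [h, PySem.List.foldl_append_singleton_eq_map]
  simp

lemma pvPieceFun_ne_nil (col : List Char) (i : Char) :
    (if i = ' ' then [i] else col ++ [i]) ≠ [] := by
  split <;> simp

-- filterMap-over-range form of the step-4 stride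
theorem pvKeyStride {α : Type} (ys : List α) :
    List.filterMap (fun j => ys[4 * j]?) (List.range ((ys.length + 3) / 4)) = pvStride4 ys := by
  match ys with
  | [] => simp [pvStride4_nil]
  | [a] => simp [pvStride4_cons, pvStride4_nil, List.range_succ]
  | [a, b] =>
      have h : ((2 : Nat) + 3) / 4 = 1 := by norm_num
      simp [pvStride4_cons, pvStride4_nil, h, List.range_succ]
  | [a, b, c] =>
      have h : ((3 : Nat) + 3) / 4 = 1 := by norm_num
      simp [pvStride4_cons, pvStride4_nil, h, List.range_succ]
  | a :: b :: c :: d :: t =>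
      have hcnt : ((a :: b :: c :: d :: t).length + 3) / 4 = (t.length + 3) / 4 + 1 := by
        simp; omega
      rw [hcnt, List.range_succ_eq_map]
      have hidx : ∀ j : Nat, (a :: b :: c :: d :: t)[4 * (j + 1)]? = t[4 * j]? := by
        intro j
        have h4 : 4 * (j + 1) = 4 * j + 4 := by omega
        simp [h4]
      simp only [List.filterMap_cons, List.filterMap_map, Function.comp_def, hidx]
      have hz : (a :: b :: c :: d :: t)[4 * 0]? = some a := by simp
      rw [pvStride4_cons]
      simp only [hz, List.drop_succ_cons]
      have ih := pvKeyStride t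
      simp [ih]
termination_by ys.length

lemma pvSlice4 {α : Type} (xs : List α) (k : Nat) :
    PySem.List.slice? xs (some (k : Int)) none 4 = some (pvStride4 (xs.drop k)) := by
  have hSI : PySem.List.sliceIndices xs.length (some (k : Int)) none 4
      = (min (k : Int) xs.length, (xs.length : Int), 4) := by
    unfold PySem.List.sliceIndices
    simp [show ¬((4 : Int) < 0) from by norm_num, show ¬((k : Int) < 0) from by omega]
  unfold PySem.List.slice?
  rw [if_neg (by norm_num), hSI]
  by_cases hlt : k < xs.length
  · have hmin : min (k : Int) (xs.length : Int) = (k : Int) := by omega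
    have hse : (k : Int) < (xs.length : Int) := by exact_mod_cast hlt
    simp only [hmin, show (0 : Int) < 4 from by norm_num, if_pos, hse]
    have hc : (((xs.length : Int) - (k : Int) + 4 - 1) / 4).toNat = (xs.length - k + 3) / 4 := by
      omega
    rw [hc]
    congr 1
    have hdrop : (xs.drop k).length = xs.length - k := by simp
    rw [← pvKeyStride (xs.drop k), hdrop]
    apply List.filterMap_congr
    intro j hj
    have h1 : ((k : Int) + 4 * (j : Int)).toNat = k + 4 * j := by omega
    rw [h1, List.getElem?_drop]
  · have hmin : min (k : Int) (xs.length : Int) = (xs.length : Int) := by omega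
    have hse : ¬((xs.length : Int) < (xs.length : Int)) := by omega
    simp only [hmin, show (0 : Int) < 4 from by norm_num, if_pos, hse, if_false]
    rw [List.drop_eq_nil_of_le (by omega), pvStride4_nil]
    simp
lemma pvSlice4_none {α : Type} (xs : List α) :
    PySem.List.slice? xs none none 4 = some (pvStride4 xs) := by
  have h : PySem.List.slice? xs none none 4 = PySem.List.slice? xs (some ((0 : Nat) : Int)) none 4 := by
    unfold PySem.List.slice? PySem.List.sliceIndices
    norm_num
  rw [h, pvSlice4]
  simp

-- the B-side fold over enumerate computes pvSpec
lemma pvAltFold (c1l c2l c3l : List Char) (cs : List Char) :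
    ∀ (s : Nat) (out : List (List Char)),
    (PySem.List.enumerate cs (s : Int)).foldl
      (fun out p =>
        out ++ [if p.2 = ' ' then [p.2]
                else PySem.List.pyGetD [c1l, c2l, c3l, c2l] (PySem.Int.mod p.1 4) [] ++ [p.2]]) out
      = out ++ pvSpec c1l c2l c3l cs s := by
  induction cs with
  | nil => intro s out; simp [PySem.List.enumerate, pvSpec]
  | cons ch t ih =>
      intro s out
      have hmod : PySem.Int.mod (s : Int) 4 = ((s % 4 : Nat) : Int) := by
        simp
      have hcons : PySem.List.enumerate (ch :: t) (s : Int)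
          = ((s : Int), ch) :: PySem.List.enumerate t ((s : Int) + 1) := rfl
      have hone : ((s : Int) + 1) = ((s + 1 : Nat) : Int) := by push_cast; omega
      have hpiece : (if ch = ' ' then [ch]
          else PySem.List.pyGetD [c1l, c2l, c3l, c2l] (PySem.Int.mod ((s : Int)) 4) [] ++ [ch])
          = pvPiece c1l c2l c3l s ch := by
        unfold pvPiece
        rw [hmod, PySem.List.pyGetD_natCast]
      rw [hcons]
      simp only [List.foldl_cons]
      rw [hpiece, hone, ih (s + 1)]
      simp [pvSpec]
  -- the A-side interleaving fold computes pvSpec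

theorem pvMain (c1l c2l c3l : List Char) (cs : List Char) (form : List (List Char)) :
    (pvZip4 ((pvStride4 cs).map (fun i => if i = ' ' then [i] else c1l ++ [i]))
            ((pvStride4 (cs.drop 1)).map (fun i => if i = ' ' then [i] else c2l ++ [i]))
            ((pvStride4 (cs.drop 2)).map (fun i => if i = ' ' then [i] else c3l ++ [i]))
            ((pvStride4 (cs.drop 3)).map (fun i => if i = ' ' then [i] else c2l ++ [i]))).foldl
      (fun form t => pvAppIf (pvAppIf (pvAppIf (pvAppIf form t.1) t.2.1) t.2.2.1) t.2.2.2) form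
      = form ++ pvSpec c1l c2l c3l cs 0 := by
  match cs with
  | [] =>
      simp [pvStride4_nil, pvZip4_nil, pvSpec]
  | [a] =>
      rw [show ([a] : List Char).drop 1 = [] from rfl, show ([a] : List Char).drop 2 = [] from rfl,
        show ([a] : List Char).drop 3 = [] from rfl]
      simp only [pvStride4_cons, pvStride4_nil, List.drop_nil, List.map_cons, List.map_nil]
      rw [pvZip4_step _ _ _ _ (by simp)]
      simp only [List.head?_cons, List.head?_nil, List.tail_cons, List.tail_nil]
      rw [pvZip4_nil]
      simp [pvAppIf, pvPieceFun_ne_nil c1l a, pvSpec, pvPiece]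
  | [a, b] =>
      rw [show ([a, b] : List Char).drop 1 = [b] from rfl, show ([a, b] : List Char).drop 2 = [] from rfl,
        show ([a, b] : List Char).drop 3 = [] from rfl]
      simp only [pvStride4_cons, pvStride4_nil, List.drop_nil, List.map_cons, List.map_nil,
        List.drop_succ_cons]
      rw [pvZip4_step _ _ _ _ (by simp)]
      simp only [List.head?_cons, List.head?_nil, List.tail_cons, List.tail_nil]
      rw [pvZip4_nil]
      simp [pvAppIf, pvPieceFun_ne_nil c1l a, pvPieceFun_ne_nil c2l b, pvSpec, pvPiece]
  | [a, b, c] =>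
      rw [show ([a, b, c] : List Char).drop 1 = [b, c] from rfl,
        show ([a, b, c] : List Char).drop 2 = [c] from rfl,
        show ([a, b, c] : List Char).drop 3 = [] from rfl]
      simp only [pvStride4_cons, pvStride4_nil, List.drop_nil, List.map_cons, List.map_nil,
        List.drop_succ_cons]
      rw [pvZip4_step _ _ _ _ (by simp)]
      simp only [List.head?_cons, List.head?_nil, List.tail_cons, List.tail_nil]
      rw [pvZip4_nil]
      simp [pvAppIf, pvPieceFun_ne_nil c1l a, pvPieceFun_ne_nil c2l b, pvPieceFun_ne_nil c3l c,
        pvSpec, pvPiece]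
  | a :: b :: c :: d :: t =>
      have h0 : pvStride4 (a :: b :: c :: d :: t) = a :: pvStride4 t := by
        rw [pvStride4_cons]
        try rfl
      have h1 : pvStride4 ((a :: b :: c :: d :: t).drop 1) = b :: pvStride4 (t.drop 1) := by
        rw [show (a :: b :: c :: d :: t).drop 1 = b :: c :: d :: t from rfl, pvStride4_cons]
        try rfl
      have h2 : pvStride4 ((a :: b :: c :: d :: t).drop 2) = c :: pvStride4 (t.drop 2) := by
        rw [show (a :: b :: c :: d :: t).drop 2 = c :: d :: t from rfl, pvStride4_cons]
        try rfl
      have h3 : pvStride4 ((a :: b :: c :: d :: t).drop 3) = d :: pvStride4 (t.drop 3) := by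
        rw [show (a :: b :: c :: d :: t).drop 3 = d :: t from rfl, pvStride4_cons]
        try rfl
      rw [h0, h1, h2, h3]
      simp only [List.map_cons]
      rw [pvZip4_step _ _ _ _ (by simp)]
      simp only [List.head?_cons, List.tail_cons, List.foldl_cons]
      rw [pvMain c1l c2l c3l t]
      have hspec : pvSpec c1l c2l c3l (a :: b :: c :: d :: t) 0
          = pvPiece c1l c2l c3l 0 a :: pvPiece c1l c2l c3l 1 b :: pvPiece c1l c2l c3l 2 c
            :: pvPiece c1l c2l c3l 3 d :: pvSpec c1l c2l c3l t 0 := by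
        show pvPiece c1l c2l c3l 0 a :: pvSpec c1l c2l c3l (b :: c :: d :: t) 1 = _
        rw [show pvSpec c1l c2l c3l (b :: c :: d :: t) 1
            = pvPiece c1l c2l c3l 1 b :: pvPiece c1l c2l c3l 2 c :: pvPiece c1l c2l c3l 3 d
              :: pvSpec c1l c2l c3l t 4 from rfl]
        rw [show (4 : Nat) = 0 + 4 from rfl, pvSpec_shift]
      rw [hspec]
      simp [pvAppIf, pvPieceFun_ne_nil c1l a, pvPieceFun_ne_nil c2l b,
        pvPieceFun_ne_nil c3l c, pvPieceFun_ne_nil c2l d, pvPiece]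
termination_by cs.length

-- ===== VERDICT (by name: the statement is the Claim_ definition above) =====
theorem triplealternate_spec : Claim_equal_triplealternate := by
  intro text c1 c2 c3 _
  unfold Spec_triplealternate triplealternate triplealternate_alt
  simp only [show ((3 : Int)) = ((3 : Nat) : Int) from rfl,
    show ((2 : Int)) = ((2 : Nat) : Int) from rfl,
    show ((1 : Int)) = ((1 : Nat) : Int) from rfl,
    show ((0 : Int)) = ((0 : Nat) : Int) from rfl]
  simp only [pvSlice4, pvSlice4_none, Option.getD_some, pvColorLoop_eq_map]
  simp only [pvMain c1.toList c2.toList c3.toList text.toList]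
  simp only [pvAltFold c1.toList c2.toList c3.toList text.toList 0]
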